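-- pv_equiv track=rewrite | github.com/vgraeber/adventofcode | 2023/day11/part2.py | getgalaxylocs
-- ===== SOURCE A (Python) =====
-- def getgalaxylocs(newinputarray):
--   galaxylocs = []
--   lineexpands = 0
--   colexpands = 0
--   expandval = 1000000
--   for line in range(len(newinputarray)):
--     if (newinputarray[line] == (['*'] * len(newinputarray[line]))):
--       lineexpands += 1
--     for char in range(len(newinputarray[line])):
--       if (newinputarray[line][char] == '*'):
--         colexpands += 1
--       if (newinputarray[line][char] == '#'):
--         galaxylocs.append([(line + (lineexpands * (expandval - 1))), (char + (colexpands * (expandval - 1)))])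
--     colexpands = 0
--   return galaxylocs
-- ===== SOURCE B (Python) =====
-- def getgalaxylocs(newinputarray):
--   E = 999999  # expandval - 1
--   # phase 1: full-row prefix table (fulls[r] = number of all-'*' rows among rows 0..r)
--   fulls = []
--   full = 0
--   for row in newinputarray:
--     if all(c == '*' for c in row):
--       full += 1
--     fulls.append(full)
--   # phase 2: emit coordinates in one comprehension
--   return [[r + fulls[r] * E, c + row[:c].count('*') * E]
--           for r, row in enumerate(newinputarray)
--           for c, ch in enumerate(row) if ch == '#']
-- ===== Notes on version B (the rewrite author's own statement) =====
-- stated objective: alternative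
-- what changed: A threads two mutable accumulators (row-expansion and per-row star count) through one fused nested index loop; B first builds a prefix table of full-row counts in a separate pass and then emits each '#' coordinate in a single comprehension using a per-character prefix star count, so the coordinate emission no longer carries loop state.
import Mathlib
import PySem

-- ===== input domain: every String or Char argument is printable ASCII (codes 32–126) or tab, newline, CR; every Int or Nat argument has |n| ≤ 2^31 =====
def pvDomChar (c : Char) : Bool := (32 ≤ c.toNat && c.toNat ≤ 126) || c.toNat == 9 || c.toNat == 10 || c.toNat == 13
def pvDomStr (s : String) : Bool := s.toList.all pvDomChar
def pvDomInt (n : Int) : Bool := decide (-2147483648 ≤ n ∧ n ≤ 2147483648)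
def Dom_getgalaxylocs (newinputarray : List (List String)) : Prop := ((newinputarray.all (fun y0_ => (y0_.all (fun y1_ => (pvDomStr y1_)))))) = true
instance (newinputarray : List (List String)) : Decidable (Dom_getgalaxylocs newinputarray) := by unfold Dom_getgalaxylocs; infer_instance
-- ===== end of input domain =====

-- B replaces A's fused two-accumulator nested loop by a two-phase decomposition (a prefix
-- table of full rows, then one comprehension emitting coordinates from per-row prefix counts);
-- objective: alternative structure, same results.

-- ===== PORT A =====
def getgalaxylocs (newinputarray : List (List String)) : List (List Int) :=
  let expandval : Int := 1000000
  ((PySem.List.pyRange 0 (PySem.List.len newinputarray)).foldl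
    (fun (st : List (List Int) × Int) line =>
      let row := PySem.List.pyGetD newinputarray line []
      let lineexpands : Int := if row = List.replicate row.length "*" then st.2 + 1 else st.2
      let inner := (PySem.List.pyRange 0 (PySem.List.len row)).foldl
        (fun (st2 : List (List Int) × Int) char =>
          let colexpands : Int := if PySem.List.pyGetD row char "" = "*" then st2.2 + 1 else st2.2
          (if PySem.List.pyGetD row char "" = "#" then
             st2.1 ++ [[line + lineexpands * (expandval - 1), char + colexpands * (expandval - 1)]]
           else st2.1, colexpands))
        (st.1, 0)
      (inner.1, lineexpands))
    ([], 0)).1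

-- ===== PORT B =====
def getgalaxylocs_alt (newinputarray : List (List String)) : List (List Int) :=
  let E : Int := 999999
  let fulls : List Int :=
    (newinputarray.foldl
      (fun (st : List Int × Int) row =>
        let full : Int := if row.all (fun ch => ch = "*") then st.2 + 1 else st.2
        (st.1 ++ [full], full))
      ([], 0)).1
  (PySem.List.enumerate newinputarray).flatMap (fun rp =>
    (PySem.List.enumerate rp.2).flatMap (fun cp =>
      if cp.2 = "#" then
        [[rp.1 + PySem.List.pyGetD fulls rp.1 0 * E,
          cp.1 + ((PySem.List.slice rp.2 none (some cp.1)).count "*" : Int) * E]]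
      else []))

-- ===== PRECONDITION & SPEC =====
def Spec_getgalaxylocs (newinputarray : List (List String)) (out : List (List Int)) : Prop := out = getgalaxylocs_alt newinputarray
instance (newinputarray : List (List String)) (out : List (List Int)) : Decidable (Spec_getgalaxylocs newinputarray out) := by unfold Spec_getgalaxylocs; infer_instance

-- ===== CLAIM (what is proved, stated in full; the proofs are below) =====
def Claim_equal_getgalaxylocs : Prop := ∀ (newinputarray : List (List String)), Dom_getgalaxylocs newinputarray → Spec_getgalaxylocs newinputarray (getgalaxylocs newinputarray)

-- ===== LEMMAS AND PROOFS =====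

-- full-row test and counters used to characterise both programs
def pvFull (row : List String) : Bool := row.all (fun ch => ch = "*")

def pvFullCnt (rows : List (List String)) : Int := (rows.countP pvFull : Int)

-- emissions of one row's first n characters, with row index r and full-row offset le
def pvRowEmitN (row : List String) (n : Nat) (r le : Int) : List (List Int) :=
  (List.range n).flatMap (fun c =>
    if row.getD c "" = "#" then
      [[r + le * 999999, (c : Int) + (((row.take c).count "*" : Nat) : Int) * 999999]]
    else [])

-- all emissions of the first n rows
def pvGalN (rows : List (List String)) (n : Nat) : List (List Int) :=
  (List.range n).flatMap (fun rr =>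
    pvRowEmitN (rows.getD rr []) (rows.getD rr []).length (rr : Int)
      (pvFullCnt (rows.take (rr + 1))))

lemma pvFull_iff (row : List String) :
    (row = List.replicate row.length "*") ↔ pvFull row = true := by
  rw [List.eq_replicate_length]
  simp [pvFull]

lemma pvFlatMapCongr {α β : Type} (l : List α) (f g : α → List β)
    (h : ∀ a ∈ l, f a = g a) : l.flatMap f = l.flatMap g := by
  induction l with
  | nil => rfl
  | cons x xs ih =>
    simp only [List.flatMap_cons]
    rw [h x (by simp), ih (fun a ha => h a (by simp [ha]))]

-- A's inner loop over the first n characters of a row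
set_option maxRecDepth 4096 in
lemma pvInnerA (row : List String) (r le : Int) :
    ∀ (n : Nat) (g : List (List Int)),
      ((List.range n).foldl
        (fun (st2 : List (List Int) × Int) (c : Nat) =>
          let ce : Int := if row.getD c "" = "*" then st2.2 + 1 else st2.2
          (if row.getD c "" = "#" then
             st2.1 ++ [[r + le * 999999, (c : Int) + ce * 999999]]
           else st2.1, ce))
        (g, 0))
      = (g ++ pvRowEmitN row n r le, (((row.take n).count "*" : Nat) : Int)) := by
  intro n
  induction n with
  | zero => intro g; simp [pvRowEmitN]
  | succ n ih =>
    intro g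
    rw [List.range_succ, List.foldl_append, ih]
    by_cases hn : n < row.length
    · have he : row[n]? = some row[n] := List.getElem?_eq_getElem hn
      have htake : row.take (n + 1) = row.take n ++ [row[n]] := by
        rw [List.take_add_one]; simp [he]
      by_cases h1 : row[n] = "*"
      · simp [pvRowEmitN, List.range_succ, he, h1, htake, List.count_append,
          List.count_cons]
      · by_cases h2 : row[n] = "#"
        · simp [pvRowEmitN, List.range_succ, he, h1, h2, htake, List.count_append,
            List.count_cons]
        · have hc1 : (row[n]?.getD "" = "*") = False := by simp [he, h1]
          have hc2 : (row[n]?.getD "" = "#") = False := by simp [he, h2]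
          have hb : (row[n] == "*") = false := by simp [h1]
          have hone : List.count "*" [row[n]] = 0 := by
            rw [List.count_eq_zero]
            simp only [List.mem_singleton]
            exact Ne.symm h1
          have hcnt : (row.take (n + 1)).count "*" = (row.take n).count "*" := by
            rw [htake, List.count_append, hone]
            omega
          simp [pvRowEmitN, List.range_succ, hc1, hc2, hcnt]
    · have he : row[n]? = none := by
        rw [List.getElem?_eq_none_iff]; omega
      have htake : row.take (n + 1) = row.take n := by
        rw [List.take_add_one]; simp [he]
      simp [pvRowEmitN, List.range_succ, he, htake]

-- counting full rows one row further
lemma pvFullCntTake (rows : List (List String)) (n : Nat) (hn : n < rows.length) :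
    pvFullCnt (rows.take (n + 1))
      = pvFullCnt (rows.take n) + (if pvFull (rows.getD n []) then 1 else 0) := by
  have htake : rows.take (n + 1) = rows.take n ++ [rows[n]] := by
    rw [List.take_add_one]
    simp [List.getElem?_eq_getElem hn]
  have hg : rows.getD n [] = rows[n] := List.getD_eq_getElem rows [] hn
  rw [htake, hg]
  unfold pvFullCnt
  rw [List.countP_append]
  by_cases hf : pvFull rows[n] = true
  · simp [hf, List.countP_cons]
  · simp [hf, List.countP_cons]

-- characterisation of B's prefix table
lemma pvFullsSpec :
    ∀ (rows : List (List String)) (acc : List Int) (c : Int),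
      (rows.foldl
        (fun (st : List Int × Int) row =>
          let full : Int := if row.all (fun ch => ch = "*") then st.2 + 1 else st.2
          (st.1 ++ [full], full))
        (acc, c)).1
      = acc ++ (List.range rows.length).map (fun rr => c + pvFullCnt (rows.take (rr + 1))) := by
  intro rows
  induction rows with
  | nil => intro acc c; simp
  | cons row rest ih =>
    intro acc c
    simp only [List.foldl_cons]
    rw [ih]
    rw [List.length_cons, List.range_succ_eq_map, List.map_cons, List.map_map]
    have h1 : pvFullCnt ((row :: rest).take (0 + 1)) = (if pvFull row then 1 else 0) := by
      simp [pvFullCnt, List.countP_cons, pvFull]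
    have h2 : ((fun rr => c + pvFullCnt ((row :: rest).take (rr + 1))) ∘ Nat.succ)
        = fun rr => (c + (if pvFull row then 1 else 0)) + pvFullCnt (rest.take (rr + 1)) := by
      funext rr
      simp only [Function.comp_apply, Nat.succ_eq_add_one]
      have : (row :: rest).take (rr + 1 + 1) = row :: rest.take (rr + 1) := by
        simp [List.take_succ_cons]
      rw [this]
      simp only [pvFullCnt, List.countP_cons]
      by_cases hf : pvFull row = true
      · simp [hf]; push_cast; ring
      · simp [hf]
    by_cases hf : pvFull row = true
    · simp only [pvFull] at hf
      simp only [hf, if_true, h2, h1]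
      simp [hf, List.append_assoc, pvFull]
    · simp only [pvFull] at hf
      simp only [hf, if_false, h2, h1]
      simp [hf, List.append_assoc, pvFull]

-- B's inner comprehension over one row equals the row-emission normal form
lemma pvInnerB (row : List String) (r f : Int) :
    (PySem.List.enumerate row).flatMap (fun cp =>
      if cp.2 = "#" then
        [[r + f * 999999,
          cp.1 + ((PySem.List.slice row none (some cp.1)).count "*" : Int) * 999999]]
      else [])
    = pvRowEmitN row row.length r f := by
  rw [PySem.List.enumerate_eq_map_pyRange row "", List.flatMap_map, PySem.List.len_eq,
    PySem.List.pyRange_zero_natCast, List.flatMap_map]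
  unfold pvRowEmitN
  apply pvFlatMapCongr
  intro c _
  simp [PySem.List.slice_to_natCast, PySem.List.count_eq, List.count]

lemma pvAltEq (rows : List (List String)) :
    getgalaxylocs_alt rows = pvGalN rows rows.length := by
  unfold getgalaxylocs_alt
  simp only []
  rw [pvFullsSpec rows [] 0, List.nil_append]
  rw [PySem.List.enumerate_eq_map_pyRange rows [], List.flatMap_map, PySem.List.len_eq,
    PySem.List.pyRange_zero_natCast, List.flatMap_map]
  unfold pvGalN
  apply pvFlatMapCongr
  intro rr hrr
  have hrr' : rr < rows.length := List.mem_range.mp hrr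
  have hfull : PySem.List.pyGetD
      ((List.range rows.length).map (fun k => 0 + pvFullCnt (rows.take (k + 1)))) (rr : Int) 0
      = pvFullCnt (rows.take (rr + 1)) := by
    rw [PySem.List.pyGetD_natCast]
    simp [List.getD, hrr']
  simp only [PySem.List.pyGetD_natCast, hfull]
  rw [pvInnerB]

lemma pvOuterA (rows : List (List String)) :
    ∀ (n : Nat), n ≤ rows.length →
      ((List.range n).foldl
        (fun (st : List (List Int) × Int) (line : Nat) =>
          let row := rows.getD line []
          let lineexpands : Int := if row = List.replicate row.length "*" then st.2 + 1 else st.2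
          let inner := (PySem.List.pyRange 0 (PySem.List.len row)).foldl
            (fun (st2 : List (List Int) × Int) char =>
              let colexpands : Int := if PySem.List.pyGetD row char "" = "*" then st2.2 + 1 else st2.2
              (if PySem.List.pyGetD row char "" = "#" then
                 st2.1 ++ [[(line : Int) + lineexpands * 999999, (char : Int) + colexpands * 999999]]
               else st2.1, colexpands))
            (st.1, 0)
          (inner.1, lineexpands))
        ([], 0))
      = (pvGalN rows n, pvFullCnt (rows.take n)) := by
  intro n
  induction n with
  | zero => intro _; simp [pvGalN, pvFullCnt]
  | succ n ih =>
    intro h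
    have hn : n < rows.length := by omega
    rw [List.range_succ, List.foldl_append, ih (by omega)]
    simp only [List.foldl_cons, List.foldl_nil]
    rw [PySem.List.len_eq, PySem.List.pyRange_zero_natCast, List.foldl_map]
    simp only [PySem.List.pyGetD_natCast, pvFull_iff]
    rw [pvInnerA]
    rw [pvFullCntTake rows n hn]
    simp only [pvGalN, List.range_succ, List.flatMap_append, List.flatMap_cons,
      List.flatMap_nil, List.append_nil]
    by_cases hf : pvFull (rows[n]?.getD []) = true
    · rw [pvFullCntTake rows n hn]
      simp [hf, List.getD]
    · rw [pvFullCntTake rows n hn]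
      simp [hf, List.getD]

lemma pvAEq (rows : List (List String)) :
    getgalaxylocs rows = pvGalN rows rows.length := by
  unfold getgalaxylocs
  simp only []
  rw [PySem.List.len_eq, PySem.List.pyRange_zero_natCast, List.foldl_map]
  simp only [PySem.List.pyGetD_natCast,
    show ((1000000 : Int) - 1) = 999999 by norm_num]
  rw [pvOuterA rows rows.length le_rfl]

-- ===== VERDICT (by name: the statement is the Claim_ definition above) =====
theorem getgalaxylocs_spec : Claim_equal_getgalaxylocs := by
  intro rows _
  unfold Spec_getgalaxylocs
  rw [pvAEq, pvAltEq]
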